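-- pv_equiv track=rewrite | github.com/zhoubot/linx-isa | tools/bringup/gate_report.py | _split_csv_items
-- ===== SOURCE A (Python) =====
-- def _split_csv_items(items: list[str] | None) -> list[str]:
--     if not items:
--         return []
--     out: list[str] = []
--     for item in items:
--         for piece in item.split(","):
--             norm = piece.strip()
--             if norm:
--                 out.append(norm)
--     return out
-- ===== SOURCE B (Python) =====
-- def _token(buf):
--     # manual strip: peel whitespace chars off the front, then off the back
--     while buf and buf[0].isspace():
--         buf = buf[1:]
--     while buf and buf[-1].isspace():
--         buf = buf[:-1]
--     return buf
--
--
-- def _split_csv_items(items):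
--     # character-level tokenizer: ',' flushes the current buffer, other chars extend it
--     if not items:
--         return []
--     out = []
--     for item in items:
--         buf = []
--         for c in item:
--             if c == ",":
--                 t = _token(buf)
--                 if t:
--                     out.append("".join(t))
--                 buf = []
--             else:
--                 buf.append(c)
--         t = _token(buf)
--         if t:
--             out.append("".join(t))
--     return out
-- ===== Notes on version B (the rewrite author's own statement) =====
-- stated objective: alternative
-- what changed: B replaces A's per-item library split/strip pipeline with a hand-written character-level tokenizer: one state machine over each item's characters that maintains the current token buffer, flushes it on ',', and trims whitespace manually when emitting; no str.split or str.strip is called.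
import Mathlib
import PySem

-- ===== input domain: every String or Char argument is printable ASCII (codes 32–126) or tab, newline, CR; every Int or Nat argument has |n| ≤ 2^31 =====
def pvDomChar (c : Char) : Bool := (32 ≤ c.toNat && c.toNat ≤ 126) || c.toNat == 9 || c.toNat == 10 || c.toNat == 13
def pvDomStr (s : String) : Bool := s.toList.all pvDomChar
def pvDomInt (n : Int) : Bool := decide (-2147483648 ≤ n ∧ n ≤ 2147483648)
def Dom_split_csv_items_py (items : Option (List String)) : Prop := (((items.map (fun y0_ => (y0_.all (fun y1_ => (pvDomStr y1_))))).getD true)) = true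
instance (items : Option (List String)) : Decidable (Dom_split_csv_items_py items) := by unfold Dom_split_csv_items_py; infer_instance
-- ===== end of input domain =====

-- B replaces A's per-item split/strip pipeline with a hand-written character-level
-- tokenizer (buffer + flush-on-comma, manual whitespace trimming); alternative algorithm, same cost.

-- ===== PORT A =====
-- item.split(",") is ported with PySem.Chars.splitOn (the sep ≠ "" form of str.split), exact.
def split_csv_items_py (items : Option (List String)) : List String :=
  match items with
  | none => []
  | some l =>
    if l = [] then []
    else
      l.foldl (fun out item =>
        ((PySem.Chars.splitOn item.toList ",".toList).map String.ofList).foldl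
          (fun out piece =>
            let norm := PySem.Str.strip piece
            if norm ≠ "" then out ++ [norm] else out) out) []

-- ===== PORT B =====
-- Source B's first while loop in _token: peel whitespace chars off the front
def pvTrimFront : List Char → List Char
  | [] => []
  | c :: r => if PySem.Chars.isspace c then pvTrimFront r else c :: r

-- Source B's _token: the second while peels chars off the BACK one at a time,
-- which is exactly the front loop run on the reversed buffer (exact).
def pvToken (buf : List Char) : List Char :=
  (pvTrimFront (pvTrimFront buf).reverse).reverse

-- Source B's "t = _token(buf); if t: out.append(''.join(t))"
def pvEmit (buf : List Char) (out : List String) : List String :=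
  let t := pvToken buf
  if t = [] then out else out ++ [String.ofList t]

def split_csv_items_py_alt (items : Option (List String)) : List String :=
  match items with
  | none => []
  | some l =>
    if l = [] then []
    else
      l.foldl (fun out item =>
        let st := item.toList.foldl
          (fun (st : List Char × List String) c =>
            if c = ',' then ([], pvEmit st.1 st.2) else (st.1 ++ [c], st.2))
          ([], out)
        pvEmit st.1 st.2) []

-- ===== PRECONDITION & SPEC =====
def Spec_split_csv_items_py (items : Option (List String)) (out : List String) : Prop := out = split_csv_items_py_alt items
instance (items : Option (List String)) (out : List String) : Decidable (Spec_split_csv_items_py items out) := by unfold Spec_split_csv_items_py; infer_instance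

-- ===== CLAIM (what is proved, stated in full; the proofs are below) =====
def Claim_equal_split_csv_items_py : Prop := ∀ (items : Option (List String)), Dom_split_csv_items_py items → Spec_split_csv_items_py items (split_csv_items_py items)

-- ===== LEMMAS AND PROOFS =====

-- A's piece-normalising step, as an Option
def pvNorm (piece : String) : Option String :=
  let norm := PySem.Str.strip piece
  if norm = "" then none else some norm

-- B's buffer-normalising step, as an Option
def pvNormC (cs : List Char) : Option String :=
  let t := pvToken cs
  if t = [] then none else some (String.ofList t)

-- A's inner loop appends exactly the kept pieces
theorem pv_inner_fold (ps : List String) (out : List String) :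
    ps.foldl (fun out piece =>
      let norm := PySem.Str.strip piece
      if norm ≠ "" then out ++ [norm] else out) out = out ++ ps.filterMap pvNorm := by
  induction ps generalizing out with
  | nil => simp
  | cons p ps ih =>
    simp only [List.foldl_cons, List.filterMap_cons]
    rw [ih]
    by_cases h : PySem.Str.strip p = "" <;> simp [pvNorm, h]

-- the fueled splitOn.go, characterised by Mathlib's List.splitOn (single-char separator)
theorem pv_go_spec (c : Char) (fuel : Nat) :
    ∀ (l cur : List Char) (acc : List (List Char)), l.length < fuel →
      PySem.Chars.splitOn.go [c] fuel l cur acc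
        = acc.reverse ++ (List.splitOn c l).modifyHead (cur.reverse ++ ·) := by
  induction fuel with
  | zero => intro l cur acc h; omega
  | succ fuel ih =>
    intro l cur acc h
    match l with
    | [] =>
      rw [PySem.Chars.splitOn.go.eq_def]
      simp [List.splitOn, List.splitOnP_nil]
    | c' :: rest =>
      rw [PySem.Chars.splitOn.go.eq_def]
      by_cases hc : c = c'
      · subst hc
        have hp : List.isPrefixOf [c] (c :: rest) = true := by
          simp [List.isPrefixOf]
        simp only [hp, if_true]
        rw [ih _ _ _ (by simp at h ⊢; omega)]
        simp only [List.splitOn, List.splitOnP_cons, beq_self_eq_true, if_true]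
        have hne := List.splitOnP_ne_nil (fun a => a == c) rest
        match hres : List.splitOnP (fun a => a == c) rest with
        | [] => exact absurd hres hne
        | x :: xs => simp
      · have hp : List.isPrefixOf [c] (c' :: rest) = false := by
          simp [List.isPrefixOf]; exact hc
        simp only [hp, Bool.false_eq_true, if_false]
        rw [ih _ _ _ (by simp at h ⊢; omega)]
        have hne := List.splitOnP_ne_nil (fun a => a == c) rest
        simp only [List.splitOn, List.splitOnP_cons, beq_iff_eq]
        rw [if_neg (by exact fun h => hc h.symm)]
        match hres : List.splitOnP (fun a => a == c) rest with
        | [] => exact absurd hres hne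
        | x :: xs => simp

theorem pv_splitOn_eq (c : Char) (l : List Char) :
    PySem.Chars.splitOn l [c] = List.splitOn c l := by
  rw [PySem.Chars.splitOn, pv_go_spec c (l.length+1) l [] [] (by omega)]
  have hne := List.splitOnP_ne_nil (fun a => a == c) l
  simp only [List.splitOn] at *
  match h : List.splitOnP (fun a => a == c) l with
  | [] => exact absurd h hne
  | x :: xs => simp

-- splitOn distributes over a separator seam
theorem pv_splitOn_append (c : Char) (a b : List Char) :
    List.splitOn c (a ++ c :: b) = List.splitOn c a ++ List.splitOn c b := by
  induction a with
  | nil => simp [List.splitOn, List.splitOnP_cons, List.splitOnP_nil]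
  | cons x xs ih =>
    simp only [List.cons_append, List.splitOn, List.splitOnP_cons] at *
    by_cases hx : x = c
    · simp [hx, ih]
    · simp only [beq_iff_eq, hx, if_false, ih]
      have hne := List.splitOnP_ne_nil (fun a => a == c) xs
      match hres : List.splitOnP (fun a => a == c) xs with
      | [] => exact absurd hres hne
      | y :: ys => simp

-- a comma-free list splits into itself
theorem pv_splitOn_no_comma (l : List Char) (h : ',' ∉ l) : List.splitOn ',' l = [l] := by
  induction l with
  | nil => simp [List.splitOn, List.splitOnP_nil]
  | cons x xs ih =>
    have hx : ¬ (x = ',') := fun hc => h (hc ▸ List.mem_cons_self)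
    have hxs : ',' ∉ xs := fun hc => h (List.mem_cons_of_mem _ hc)
    have := ih hxs
    simp only [List.splitOn, List.splitOnP_cons, beq_iff_eq, hx, if_false] at *
    rw [this]
    rfl

-- A's whole loop nest, flattened
theorem pv_A_fold (l : List String) (out : List String) :
    l.foldl (fun out item =>
      ((PySem.Chars.splitOn item.toList ",".toList).map String.ofList).foldl
        (fun out piece =>
          let norm := PySem.Str.strip piece
          if norm ≠ "" then out ++ [norm] else out) out) out
    = out ++ l.flatMap (fun item =>
        (List.splitOn ',' item.toList).filterMap (fun cs => pvNorm (String.ofList cs))) := by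
  induction l generalizing out with
  | nil => simp
  | cons item rest ih =>
    simp only [List.foldl_cons, List.flatMap_cons]
    rw [pv_inner_fold, ih]
    have : (",".toList : List Char) = [','] := rfl
    rw [this, pv_splitOn_eq, List.filterMap_map]
    simp [Function.comp]

-- B's front trim is dropWhile
theorem pv_trimFront_eq (l : List Char) :
    pvTrimFront l = List.dropWhile PySem.Chars.isspace l := by
  induction l with
  | nil => rfl
  | cons c r ih =>
    by_cases h : PySem.Chars.isspace c = true <;> simp [pvTrimFront, h, ih]

-- B's token is exactly Python's strip on the buffer
theorem pv_token_eq_strip (cs : List Char) : pvToken cs = PySem.Chars.strip cs := by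
  simp [pvToken, pv_trimFront_eq, PySem.Chars.strip, PySem.Chars.lstrip, PySem.Chars.rstrip]

-- B's normaliser agrees with A's on the packed buffer
theorem pv_normC_eq (cs : List Char) : pvNormC cs = pvNorm (String.ofList cs) := by
  have htl : (PySem.Str.strip (String.ofList cs)).toList = pvToken cs := by
    rw [pv_token_eq_strip]; simp [PySem.Str.toList_strip]
  unfold pvNormC pvNorm
  by_cases h : pvToken cs = []
  · have : PySem.Str.strip (String.ofList cs) = "" := by
      apply String.toList_inj.mp; rw [htl, h]; rfl
    simp [h, this]
  · have hne : PySem.Str.strip (String.ofList cs) ≠ "" := by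
      intro he; apply h; rw [← htl, he]; rfl
    have : PySem.Str.strip (String.ofList cs) = String.ofList (pvToken cs) := by
      apply String.toList_inj.mp; rw [htl]; simp
    simp [h, this]

-- the scan invariant: B's inner character fold emits the split/filter result
theorem pv_scan_fold (cs : List Char) :
    ∀ (buf : List Char) (out : List String), ',' ∉ buf →
      pvEmit (cs.foldl
          (fun (st : List Char × List String) c =>
            if c = ',' then ([], pvEmit st.1 st.2) else (st.1 ++ [c], st.2))
          (buf, out)).1
        (cs.foldl
          (fun (st : List Char × List String) c =>
            if c = ',' then ([], pvEmit st.1 st.2) else (st.1 ++ [c], st.2))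
          (buf, out)).2
      = out ++ (List.splitOn ',' (buf ++ cs)).filterMap pvNormC := by
  induction cs with
  | nil =>
    intro buf out hbuf
    simp only [List.foldl_nil, List.append_nil, pv_splitOn_no_comma buf hbuf,
      List.filterMap_cons, List.filterMap_nil]
    unfold pvEmit pvNormC
    by_cases h : pvToken buf = [] <;> simp [h]
  | cons c rest ih =>
    intro buf out hbuf
    by_cases hc : c = ','
    · subst hc
      simp only [List.foldl_cons, if_true]
      rw [ih [] (pvEmit buf out) (by simp), List.nil_append,
        pv_splitOn_append ',' buf rest, pv_splitOn_no_comma buf hbuf]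
      simp only [List.cons_append, List.nil_append, List.filterMap_cons]
      unfold pvEmit pvNormC
      by_cases h : pvToken buf = [] <;> simp [h]
    · simp only [List.foldl_cons, if_neg hc]
      rw [ih (buf ++ [c]) out (by
        intro hmem
        rcases List.mem_append.mp hmem with h1 | h2
        · exact hbuf h1
        · exact hc (List.mem_singleton.mp h2).symm)]
      simp

-- B's whole loop nest, flattened
theorem pv_B_fold (l : List String) (out : List String) :
    l.foldl (fun out item =>
      let st := item.toList.foldl
        (fun (st : List Char × List String) c =>
          if c = ',' then ([], pvEmit st.1 st.2) else (st.1 ++ [c], st.2))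
        ([], out)
      pvEmit st.1 st.2) out
    = out ++ l.flatMap (fun item => (List.splitOn ',' item.toList).filterMap pvNormC) := by
  induction l generalizing out with
  | nil => simp
  | cons item rest ih =>
    simp only [List.foldl_cons, List.flatMap_cons]
    rw [pv_scan_fold item.toList [] out (by simp), ih]
    simp

-- ===== VERDICT (by name: the statement is the Claim_ definition above) =====
theorem split_csv_items_py_spec : Claim_equal_split_csv_items_py := by
  intro items _
  unfold Spec_split_csv_items_py split_csv_items_py split_csv_items_py_alt
  match items with
  | none => rfl
  | some l =>
    match l with
    | [] => simp
    | item :: rest =>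
      simp only [if_neg (List.cons_ne_nil item rest)]
      rw [pv_A_fold, pv_B_fold]
      have hfn : pvNormC = fun cs => pvNorm (String.ofList cs) := funext pv_normC_eq
      rw [hfn]
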